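-- pv_equiv track=rewrite | github.com/chriszhang3/cylinders | lib.py | check_pants_condition
-- ===== SOURCE A (Python) =====
-- def find_cylinder_in_partition(partition, cylinder):
--     """Find the M-parallel class in `partition` than contains `cylinder`.
--
--     `partition` is a list of frozen sets.
--     `cylinder` is an integer
--     Return the index of the element of `partition` that contains `cylinder`."""
--     for i, parallel_class in enumerate(partition):
--         if cylinder in parallel_class:
--             return i
--
--     # If cylinder was not found in partition
--     return None
--
-- def check_pants_condition(partition, pants_list):
--     """Check the partition satisfies any homology conditions coming from
--     the pants in pants_list.
--
--     `partition` is a partition of the horizontal cylinders into M-parallel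
--     classes.
--
--     `pants_list` is a list of pants, where each pants is a frozenset containing
--     every cylinder in the pants
--
--     The homology condition is the following:
--     the cylinders in the pants cannot be contained in exactly two distinct sets
--     in `partition`.
--     """
--
--     for pants in pants_list:
--
--         # A list of the cylinder classes that contain a cylinder of pants
--         cylinder_classes = map(
--             lambda c: find_cylinder_in_partition(partition, c),
--             pants
--         )
--         if len(set(cylinder_classes)) == 2:
--             return False
--     return True
-- ===== SOURCE B (Python) =====
-- def check_pants_condition(partition, pants_list):
--     """Class-sweep: for each pants, sweep the partition classes once, keeping
--     the set of still-unclassified cylinders; count a class when it hits that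
--     remainder, plus one unit if cylinders remain uncovered at the end."""
--     def class_count(pants):
--         remaining = set(pants)
--         count = 0
--         for parallel_class in partition:
--             hit = remaining.intersection(parallel_class)
--             if hit:
--                 count += 1
--                 remaining -= hit
--         return count if not remaining else count + 1
--     return all(class_count(pants) != 2 for pants in pants_list)
-- ===== Notes on version B (the rewrite author's own statement) =====
-- stated objective: alternative
-- what changed: Transposes the traversal: instead of classifying every cylinder by a per-cylinder first-match scan over the partition (A), B sweeps the partition classes once per pants, maintaining a shrinking set of still-unclassified cylinders, counting each class that hits the remainder and adding one unit if uncovered cylinders remain.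
import Mathlib
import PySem

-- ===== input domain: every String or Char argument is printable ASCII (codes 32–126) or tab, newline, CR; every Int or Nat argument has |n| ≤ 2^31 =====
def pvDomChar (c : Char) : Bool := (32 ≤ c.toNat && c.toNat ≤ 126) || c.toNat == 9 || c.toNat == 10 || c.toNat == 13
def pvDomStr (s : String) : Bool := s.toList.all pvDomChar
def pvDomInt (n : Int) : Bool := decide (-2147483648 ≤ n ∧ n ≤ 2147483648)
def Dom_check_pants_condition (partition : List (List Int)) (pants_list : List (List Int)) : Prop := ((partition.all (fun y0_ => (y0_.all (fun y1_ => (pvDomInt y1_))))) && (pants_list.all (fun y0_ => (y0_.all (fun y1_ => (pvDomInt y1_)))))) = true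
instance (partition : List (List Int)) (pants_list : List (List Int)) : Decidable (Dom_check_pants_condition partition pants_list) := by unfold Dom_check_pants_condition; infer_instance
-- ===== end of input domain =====

-- B transposes the traversal: instead of classifying each cylinder by scanning the
-- partition, it sweeps the classes once per pants with a shrinking remainder set
-- (an alternative algorithm; return values proved equal on all inputs).

-- ===== PORT A =====
-- 'for i, parallel_class in enumerate(partition): if cylinder in parallel_class: return i'
def fcipGo (c : Int) (i : Int) : List (List Int) → Option Int
  | [] => none
  | cls :: rest => if cls.contains c then some i else fcipGo c (i + 1) rest

def find_cylinder_in_partition (partition : List (List Int)) (cylinder : Int) : Option Int :=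
  fcipGo cylinder 0 partition

def check_pants_condition (partition : List (List Int)) (pants_list : List (List Int)) : Bool :=
  match pants_list with
  | [] => true
  | pants :: rest =>
    -- cylinder_classes = map(lambda c: find_cylinder_in_partition(partition, c), pants)
    if PySem.Set.len (PySem.Set.ofList (pants.map (find_cylinder_in_partition partition))) = 2 then
      false
    else
      check_pants_condition partition rest

-- ===== PORT B =====
-- one sweep step: hit = remaining & parallel_class; if hit: count += 1; remaining -= hit
def sweepStep (st : PySem.Set Int × Nat) (cls : List Int) : PySem.Set Int × Nat :=
  -- hit = st.remaining & cls, inlined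
  if (PySem.Set.inter st.1 cls).isEmpty then st
  else (PySem.Set.diff st.1 (PySem.Set.inter st.1 cls), st.2 + 1)

def classCount (partition : List (List Int)) (pants : List Int) : Nat :=
  let st := partition.foldl sweepStep (PySem.Set.ofList pants, 0)
  if st.1.isEmpty then st.2 else st.2 + 1

def check_pants_condition_alt (partition : List (List Int)) (pants_list : List (List Int)) : Bool :=
  pants_list.all (fun pants => classCount partition pants != 2)

-- ===== PRECONDITION & SPEC =====
def Spec_check_pants_condition (partition : List (List Int)) (pants_list : List (List Int)) (out : Bool) : Prop := out = check_pants_condition_alt partition pants_list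
instance (partition : List (List Int)) (pants_list : List (List Int)) (out : Bool) : Decidable (Spec_check_pants_condition partition pants_list out) := by unfold Spec_check_pants_condition; infer_instance

-- ===== CLAIM (what is proved, stated in full; the proofs are below) =====
def Claim_equal_check_pants_condition : Prop := ∀ (partition : List (List Int)) (pants_list : List (List Int)), Dom_check_pants_condition partition pants_list → Spec_check_pants_condition partition pants_list (check_pants_condition partition pants_list)

-- ===== LEMMAS AND PROOFS =====

-- shifting the running index of A's scan
lemma fcipGo_succ (c : Int) (i : Int) (l : List (List Int)) :
    fcipGo c (i + 1) l = Option.map (· + 1) (fcipGo c i l) := by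
  induction l generalizing i with
  | nil => rfl
  | cons cls rest ih =>
    simp only [fcipGo]
    by_cases h : c ∈ cls
    · simp [h]
    · rw [if_neg (by simpa using h), if_neg (by simpa using h), ih (i + 1), ih i]

lemma fcipGo_nonneg (c : Int) (i : Int) (l : List (List Int)) (k : Int)
    (hi : 0 ≤ i) (h : fcipGo c i l = some k) : 0 ≤ k := by
  induction l generalizing i with
  | nil => simp [fcipGo] at h
  | cons cls rest ih =>
    simp only [fcipGo] at h
    by_cases hc : c ∈ cls
    · rw [if_pos (by simpa using hc)] at h; injection h with h; omega
    · rw [if_neg (by simpa using hc)] at h; exact ih (i + 1) (by omega) h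

lemma find_cylinder_cons (cls : List Int) (rest : List (List Int)) (c : Int) :
    find_cylinder_in_partition (cls :: rest) c =
      if c ∈ cls then some 0
      else Option.map (· + 1) (find_cylinder_in_partition rest c) := by
  unfold find_cylinder_in_partition
  by_cases h : c ∈ cls
  · simp [fcipGo, h]
  · have : (0 : Int) + 1 = 1 := by norm_num
    simp [fcipGo, h, ← fcipGo_succ]

-- distinct count of a set literal equals the Finset cardinality
lemma set_len_eq_card {α : Type} [DecidableEq α] [BEq α] [LawfulBEq α] (l : List α) :
    (PySem.Set.ofList l).length = l.toFinset.card := by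
  have hperm : (PySem.Set.ofList l).Perm l.dedup := by
    refine (List.perm_ext_iff_of_nodup (PySem.Set.nodup_ofList l) l.nodup_dedup).2 ?_
    intro x
    simp [PySem.Set.mem_ofList, List.mem_dedup]
  rw [List.card_toFinset]
  exact hperm.length_eq

lemma optmap_inj : Function.Injective (Option.map (fun k : Int => k + 1)) :=
  Option.map_injective (fun a b h => by omega)

-- the class-sweep computes the number of distinct first-match classes (incl. the
-- single 'uncovered' unit), for ANY starting remainder list
lemma sweep_eq (partition : List (List Int)) :
    ∀ (R : List Int) (c : Nat),
      (if (partition.foldl sweepStep (R, c)).1.isEmpty then (partition.foldl sweepStep (R, c)).2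
       else (partition.foldl sweepStep (R, c)).2 + 1)
      = c + (R.toFinset.image (find_cylinder_in_partition partition)).card := by
  induction partition with
  | nil =>
    intro R c
    cases R with
    | nil => simp
    | cons x xs =>
      have hne : (x :: xs).toFinset.Nonempty := ⟨x, by simp⟩
      have hf : find_cylinder_in_partition ([] : List (List Int)) = fun _ => none := rfl
      simp only [List.foldl_nil, hf, List.isEmpty_cons]
      rw [Finset.image_const hne]
      simp
  | cons cls rest ih =>
    intro R c
    have hstep : (cls :: rest).foldl sweepStep (R, c) = rest.foldl sweepStep (sweepStep (R, c) cls) := rfl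
    by_cases hempty : (PySem.Set.inter R cls).isEmpty
    · -- no element of R lies in cls
      have hnone : ∀ x ∈ R, x ∉ cls := by
        intro x hx hc
        have : x ∈ PySem.Set.inter R cls := (PySem.Set.mem_inter _ _ _).2 ⟨hx, hc⟩
        rw [List.isEmpty_iff] at hempty
        simp [hempty] at this
      have hs : sweepStep (R, c) cls = (R, c) := by
        unfold sweepStep; rw [if_pos hempty]
      rw [hstep, hs, ih R c]
      congr 1
      have himg : R.toFinset.image (find_cylinder_in_partition (cls :: rest))
          = (R.toFinset.image (find_cylinder_in_partition rest)).image (Option.map (· + 1)) := by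
        rw [Finset.image_image]
        refine Finset.image_congr ?_
        intro x hx
        have hx' : x ∈ R := by simpa using hx
        simp [Function.comp, find_cylinder_cons, hnone x hx']
      rw [himg, Finset.card_image_of_injective _ optmap_inj]
    · -- some element of R lies in cls
      have hne0 : PySem.Set.inter R cls ≠ [] := by
        intro h0; exact hempty (by rw [h0]; rfl)
      obtain ⟨w, hw⟩ := List.exists_mem_of_ne_nil _ hne0
      obtain ⟨hwR, hwcls⟩ := (PySem.Set.mem_inter _ _ _).1 hw
      have hs : sweepStep (R, c) cls = (PySem.Set.diff R (PySem.Set.inter R cls), c + 1) := by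
        unfold sweepStep; rw [if_neg hempty]
      rw [hstep, hs, ih _ (c + 1)]
      -- membership of the remainder
      have hmemD : ∀ x, x ∈ PySem.Set.diff R (PySem.Set.inter R cls) ↔ x ∈ R ∧ x ∉ cls := by
        intro x
        rw [PySem.Set.mem_diff _ _ _, PySem.Set.mem_inter _ _ _]
        tauto
      have hDfin : (PySem.Set.diff R (PySem.Set.inter R cls)).toFinset
          = R.toFinset.filter (fun x => x ∉ cls) := by
        ext x
        simp [hmemD x]
      -- split R.toFinset by membership in cls
      have hsplit : R.toFinset = R.toFinset.filter (fun x => x ∈ cls) ∪ R.toFinset.filter (fun x => x ∉ cls) :=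
        (Finset.filter_union_filter_not_eq _ _).symm
      have himg_in : (R.toFinset.filter (fun x => x ∈ cls)).image (find_cylinder_in_partition (cls :: rest))
          = {some 0} := by
        have hne : (R.toFinset.filter (fun x => x ∈ cls)).Nonempty :=
          ⟨w, by simp [hwR, hwcls]⟩
        have heq : ∀ x ∈ (R.toFinset.filter (fun x => x ∈ cls) : Finset Int),
            find_cylinder_in_partition (cls :: rest) x = some 0 := by
          intro x hx
          rw [Finset.mem_filter] at hx
          simp [find_cylinder_cons, hx.2]
        calc (R.toFinset.filter (fun x => x ∈ cls)).image (find_cylinder_in_partition (cls :: rest))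
            = (R.toFinset.filter (fun x => x ∈ cls)).image (fun _ => some 0) :=
              Finset.image_congr (fun x hx => heq x (by simpa using hx))
          _ = {some 0} := Finset.image_const hne _
      have himg_out : (R.toFinset.filter (fun x => x ∉ cls)).image (find_cylinder_in_partition (cls :: rest))
          = ((R.toFinset.filter (fun x => x ∉ cls)).image (find_cylinder_in_partition rest)).image (Option.map (· + 1)) := by
        rw [Finset.image_image]
        refine Finset.image_congr ?_
        intro x hx
        have hx' : x ∉ cls := by
          simp only [Finset.coe_filter, Set.mem_setOf_eq] at hx
          exact hx.2
        simp [Function.comp, find_cylinder_cons, hx']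
      have hdisj : Disjoint ({some 0} : Finset (Option Int))
          (((R.toFinset.filter (fun x => x ∉ cls)).image (find_cylinder_in_partition rest)).image (Option.map (· + 1))) := by
        rw [Finset.disjoint_left]
        intro y hy hy'
        rw [Finset.mem_singleton] at hy
        subst hy
        rw [Finset.mem_image] at hy'
        obtain ⟨z, hz, hz0⟩ := hy'
        cases z with
        | none => simp at hz0
        | some k =>
          rw [Finset.mem_image] at hz
          obtain ⟨x, _, hx⟩ := hz
          have hk : 0 ≤ k := fcipGo_nonneg x 0 rest k le_rfl hx
          simp only [Option.map_some] at hz0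
          have : k + 1 = 0 := by injection hz0.symm with h; omega
          omega
      have hcard : (R.toFinset.image (find_cylinder_in_partition (cls :: rest))).card
          = 1 + ((R.toFinset.filter (fun x => x ∉ cls)).image (find_cylinder_in_partition rest)).card := by
        conv_lhs => rw [hsplit]
        rw [Finset.image_union, himg_in, himg_out,
          Finset.card_union_of_disjoint hdisj, Finset.card_singleton,
          Finset.card_image_of_injective _ optmap_inj]
      rw [hDfin, hcard]
      omega

-- per pants: A's distinct-class count equals B's sweep count
lemma counts_eq (partition : List (List Int)) (pants : List Int) :
    PySem.Set.len (PySem.Set.ofList (pants.map (find_cylinder_in_partition partition)))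
      = (classCount partition pants : Int) := by
  have h1 : (PySem.Set.ofList (pants.map (find_cylinder_in_partition partition))).length
      = (pants.map (find_cylinder_in_partition partition)).toFinset.card := set_len_eq_card _
  have h2 : classCount partition pants
      = (((PySem.Set.ofList pants).toFinset).image (find_cylinder_in_partition partition)).card := by
    unfold classCount
    simpa using sweep_eq partition (PySem.Set.ofList pants) 0
  have h3 : (PySem.Set.ofList pants).toFinset = pants.toFinset := by
    ext x; simp [PySem.Set.mem_ofList]
  have h4 : (pants.map (find_cylinder_in_partition partition)).toFinset
      = pants.toFinset.image (find_cylinder_in_partition partition) := by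
    ext y; simp
  rw [h2, h3, ← h4]
  simp [PySem.Set.len, h1]

lemma main_eq (partition : List (List Int)) (pants_list : List (List Int)) :
    check_pants_condition partition pants_list = check_pants_condition_alt partition pants_list := by
  induction pants_list with
  | nil => rfl
  | cons pants rest ih =>
    simp only [check_pants_condition, check_pants_condition_alt, List.all_cons]
    rw [counts_eq]
    by_cases h : classCount partition pants = 2
    · simp [h]
    · have hne : (classCount partition pants : Int) ≠ 2 := by exact_mod_cast h
      simp only [if_neg hne, ih, check_pants_condition_alt]
      simp [h]

-- ===== VERDICT (by name: the statement is the Claim_ definition above) =====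
theorem check_pants_condition_spec : Claim_equal_check_pants_condition := by
  intro partition pants_list _
  unfold Spec_check_pants_condition
  exact main_eq partition pants_list
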